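-- pv_equiv track=rewrite | github.com/MAKhodayari/CryptoMathEX03 | main.py | BlockStr2Int
-- ===== SOURCE A (Python) =====
-- def BlockStr2Int(BlockStr):
--     BlockInt = list()
--     for Row in BlockStr:
--         Temp1 = list()
--         for Char in Row:
--             Temp2 = list()
--             for Mat in Char:
--                 Temp3 = list()
--                 for Col in Mat:
--                     Temp4 = list()
--                     for Num in Col:
--                         Temp4.append(int(Num))
--                     Temp3.append(Temp4)
--                 Temp2.append(Temp3)
--             Temp1.append(Temp2)
--         BlockInt.append(Temp1)
--     return BlockInt
-- ===== SOURCE B (Python) =====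
-- def BlockStr2Int(BlockStr):
--     def conv(x, d):
--         if d == 0:
--             return int(x)
--         return [conv(e, d - 1) for e in x]
--     return conv(BlockStr, 5)
-- ===== Notes on version B (the rewrite author's own statement) =====
-- stated objective: simpler
-- what changed: Replaces the four hand-unrolled nested loops with append-accumulators by one recursive depth-indexed helper that applies int at depth 0 and maps itself over each level otherwise.
import Mathlib
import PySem

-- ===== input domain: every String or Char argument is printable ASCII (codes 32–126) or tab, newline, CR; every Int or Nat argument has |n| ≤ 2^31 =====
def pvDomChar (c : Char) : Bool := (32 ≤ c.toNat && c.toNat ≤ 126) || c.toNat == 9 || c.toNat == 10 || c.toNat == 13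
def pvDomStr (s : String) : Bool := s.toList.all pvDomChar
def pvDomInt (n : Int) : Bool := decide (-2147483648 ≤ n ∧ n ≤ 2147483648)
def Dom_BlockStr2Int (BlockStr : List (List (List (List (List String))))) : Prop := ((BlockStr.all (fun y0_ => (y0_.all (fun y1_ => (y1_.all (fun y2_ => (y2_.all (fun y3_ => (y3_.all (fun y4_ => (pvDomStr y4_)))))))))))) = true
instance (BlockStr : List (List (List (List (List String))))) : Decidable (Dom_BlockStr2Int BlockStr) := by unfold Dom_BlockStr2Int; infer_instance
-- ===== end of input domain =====

-- ===== PORT A =====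
-- B converts the same nested structure by one depth-indexed recursive helper instead of
-- four hand-unrolled accumulator loops (objective: simpler; return value only, no mutation).
-- int(Num): PySem.Int.ofStr? (none = ValueError, excluded by Pre_; getD 0 is unreachable inside Pre_)
def BlockStr2Int (BlockStr : List (List (List (List (List String))))) : List (List (List (List (List Int)))) :=
  BlockStr.foldl (fun BlockInt Row =>
    BlockInt ++ [Row.foldl (fun Temp1 Char =>
      Temp1 ++ [Char.foldl (fun Temp2 Mat =>
        Temp2 ++ [Mat.foldl (fun Temp3 Col =>
          Temp3 ++ [Col.foldl (fun Temp4 Num =>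
            Temp4 ++ [(PySem.Int.ofStr? Num).getD 0]) []]) []]) []]) []]) []

-- ===== PORT B =====
-- Source B's conv(x, d) recurses on the depth counter; with fixed nesting types this recursion
-- instantiates to one List.map per level, the leaf case (d = 0) being int(x).
def convLeaf (Num : String) : Int := (PySem.Int.ofStr? Num).getD 0
def BlockStr2Int_alt (BlockStr : List (List (List (List (List String))))) : List (List (List (List (List Int)))) :=
  BlockStr.map (fun d4 => d4.map (fun d3 => d3.map (fun d2 => d2.map (fun d1 => d1.map convLeaf))))

-- ===== PRECONDITION & SPEC =====
-- Pre_ excludes inputs where some leaf string is not accepted by Python int() (A raises ValueError there).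
def Pre_BlockStr2Int (BlockStr : List (List (List (List (List String))))) : Prop :=
  (BlockStr.all (fun y0 => y0.all (fun y1 => y1.all (fun y2 => y2.all (fun y3 => y3.all (fun y4 => (PySem.Int.ofStr? y4).isSome)))))) = true
instance (BlockStr : List (List (List (List (List String))))) : Decidable (Pre_BlockStr2Int BlockStr) := by unfold Pre_BlockStr2Int; infer_instance
def pvWitness_BlockStr2Int : List (List (List (List (List String)))) := [[[[["1", " 2 "], ["-3"]]]], []]
def Spec_BlockStr2Int (BlockStr : List (List (List (List (List String))))) (out : List (List (List (List (List Int))))) : Prop := out = BlockStr2Int_alt BlockStr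
instance (BlockStr : List (List (List (List (List String))))) (out : List (List (List (List (List Int))))) : Decidable (Spec_BlockStr2Int BlockStr out) := by unfold Spec_BlockStr2Int; infer_instance

-- ===== CLAIM (what is proved, stated in full; the proofs are below) =====
def Claim_equal_BlockStr2Int : Prop := ∀ (BlockStr : List (List (List (List (List String))))), Dom_BlockStr2Int BlockStr → Pre_BlockStr2Int BlockStr → Spec_BlockStr2Int BlockStr (BlockStr2Int BlockStr)

-- ===== LEMMAS AND PROOFS =====
theorem foldl_push {α β : Type} (f : α → β) : ∀ (l : List α) (acc : List β),
    l.foldl (fun a x => a ++ [f x]) acc = acc ++ l.map f := by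
  intro l
  induction l with
  | nil => simp
  | cons h t ih => intro acc; simp [List.foldl, ih]

-- ===== VERDICT (by name: the statement is the Claim_ definition above) =====
theorem BlockStr2Int_spec : Claim_equal_BlockStr2Int := by
  intro BlockStr _ _
  unfold Spec_BlockStr2Int BlockStr2Int BlockStr2Int_alt convLeaf
  simp only [foldl_push, List.nil_append]
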